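-- pv_equiv track=rewrite | github.com/AceRodnel14/python-scripts | FileOrganizer/renameSubdirs.py | replace_first_three_spaces
-- ===== SOURCE A (Python) =====
-- EM_DASH = "—"
--
-- def replace_first_three_spaces(name: str) -> str:
--     """Replace the first three whitespace occurrences with em-dash."""
--     parts = name.split(" ")
--     if len(parts) <= 1:
--         return name
--
--     new_name = ""
--     replacements = 0
--
--     for i, part in enumerate(parts):
--         if i == 0:
--             new_name = part
--             continue
--
--         if replacements < 3:
--             new_name += EM_DASH + part
--             replacements += 1
--         else:
--             new_name += " " + part
--
--     return new_name
-- ===== SOURCE B (Python) =====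
-- EM_DASH = "—"
--
-- def replace_first_three_spaces(name: str) -> str:
--     """Replace the first three whitespace occurrences with em-dash."""
--     out = []
--     count = 0
--     for ch in name:
--         if ch == " " and count < 3:
--             out.append(EM_DASH)
--             count += 1
--         else:
--             out.append(ch)
--     return "".join(out)
-- ===== Notes on version B (the rewrite author's own statement) =====
-- stated objective: simpler
-- what changed: B replaces the split-on-space / enumerate-rejoin pipeline with a single character-by-character scan that appends an em-dash for each of the first three spaces and copies every other character.
import Mathlib
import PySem

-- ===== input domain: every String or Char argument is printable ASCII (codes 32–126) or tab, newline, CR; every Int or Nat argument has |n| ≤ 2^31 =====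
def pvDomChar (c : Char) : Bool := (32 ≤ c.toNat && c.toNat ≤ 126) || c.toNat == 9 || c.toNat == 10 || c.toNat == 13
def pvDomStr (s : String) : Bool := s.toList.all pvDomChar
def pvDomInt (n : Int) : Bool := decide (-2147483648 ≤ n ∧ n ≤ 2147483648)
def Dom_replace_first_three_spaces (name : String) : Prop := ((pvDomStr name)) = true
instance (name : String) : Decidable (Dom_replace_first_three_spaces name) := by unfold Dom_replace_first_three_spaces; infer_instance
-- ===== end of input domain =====

-- B replaces the first three spaces in one character scan with a counter instead of splitting on " " and rejoining; simpler, same cost.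


-- ===== PORT A =====
-- EM_DASH = "—"
def pvEmDash : List Char := ['—']

-- literal port of A: split on " ", early return if ≤ 1 part, then rebuild with an enumerate loop
def replace_first_three_spaces (name : String) : String :=
  let parts := PySem.Chars.splitOn name.toList [' ']
  if parts.length ≤ 1 then name
  else
    let st := (PySem.List.enumerate parts 0).foldl
      (fun (st : List Char × Int) ip =>
        if ip.1 == 0 then (ip.2, st.2)
        else if st.2 < 3 then (st.1 ++ pvEmDash ++ ip.2, st.2 + 1)
        else (st.1 ++ [' '] ++ ip.2, st.2)) ([], 0)
    String.ofList st.1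

-- ===== PORT B =====
-- literal port of B: single scan, replacement counter
def pvScan : List Char → Int → List Char
  | [], _ => []
  | c :: cs, k =>
    if c == ' ' && k < 3 then pvEmDash ++ pvScan cs (k + 1)
    else c :: pvScan cs k

def replace_first_three_spaces_alt (name : String) : String :=
  String.ofList (pvScan name.toList 0)

-- ===== PRECONDITION & SPEC =====
def Spec_replace_first_three_spaces (name : String) (out : String) : Prop := out = replace_first_three_spaces_alt name
instance (name : String) (out : String) : Decidable (Spec_replace_first_three_spaces name out) := by unfold Spec_replace_first_three_spaces; infer_instance

-- ===== CLAIM (what is proved, stated in full; the proofs are below) =====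
def Claim_equal_replace_first_three_spaces : Prop := ∀ (name : String), Dom_replace_first_three_spaces name → Spec_replace_first_three_spaces name (replace_first_three_spaces name)

-- ===== LEMMAS AND PROOFS =====

-- simple recursive description of PySem.Chars.splitOn on the one-char separator " "
def pvSplitSp : List Char → List Char → List (List Char)
  | [], cur => [cur.reverse]
  | c :: rest, cur => if c = ' ' then cur.reverse :: pvSplitSp rest [] else pvSplitSp rest (c :: cur)

theorem pvSplitOn_go_spec (fuel : Nat) (l cur : List Char) (acc : List (List Char))
    (h : l.length ≤ fuel) :
    PySem.Chars.splitOn.go [' '] fuel l cur acc = acc.reverse ++ pvSplitSp l cur := by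
  induction fuel generalizing l cur acc with
  | zero =>
    cases l with
    | nil => simp [PySem.Chars.splitOn.go, pvSplitSp]
    | cons c rest => simp at h
  | succ n ih =>
    cases l with
    | nil => simp [PySem.Chars.splitOn.go, pvSplitSp]
    | cons c rest =>
      simp only [PySem.Chars.splitOn.go]
      by_cases hc : c = ' '
      · subst hc
        have hp : List.isPrefixOf [' '] (' ' :: rest) = true := by
          simp [List.isPrefixOf]
        simp only [hp, if_pos]
        rw [ih _ _ _ (by simpa using Nat.le_of_succ_le_succ h)]
        simp [pvSplitSp]
      · have hp : List.isPrefixOf [' '] (c :: rest) = false := by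
          simp [List.isPrefixOf, BEq.beq]
          intro h'; exact absurd h'.symm hc
        simp only [hp, Bool.false_eq_true, if_neg, not_false_iff]
        rw [ih _ _ _ (by simpa using Nat.le_of_succ_le_succ h)]
        simp [pvSplitSp, hc]

theorem pvSplitOn_eq (cs : List Char) :
    PySem.Chars.splitOn cs [' '] = pvSplitSp cs [] := by
  unfold PySem.Chars.splitOn
  rw [pvSplitOn_go_spec _ _ _ _ (by omega)]
  simp

theorem pvSplitSp_ne_nil (cs cur : List Char) : pvSplitSp cs cur ≠ [] := by
  induction cs generalizing cur with
  | nil => simp [pvSplitSp]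
  | cons c rest ih =>
    simp only [pvSplitSp]
    split
    · simp
    · exact ih _

theorem pvSplitSp_length (cs cur : List Char) :
    (pvSplitSp cs cur).length = 1 + cs.countP (· == ' ') := by
  induction cs generalizing cur with
  | nil => simp [pvSplitSp]
  | cons c rest ih =>
    by_cases hc : c = ' '
    · subst hc; simp [pvSplitSp, ih]; omega
    · simp [pvSplitSp, hc, ih]

theorem pvScan_no_space (cs : List Char) (k : Int) (h : cs.countP (· == ' ') = 0) :
    pvScan cs k = cs := by
  induction cs generalizing k with
  | nil => simp [pvScan]
  | cons c rest ih =>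
    rw [List.countP_cons] at h
    by_cases hc : c = ' '
    · subst hc
      simp only [beq_self_eq_true, if_true] at h
      omega
    · have hcb : (c == ' ') = false := by simpa using hc
      simp only [hcb, Bool.false_eq_true, if_false] at h
      simp [pvScan, hcb, ih _ (by omega)]

-- the tail of A's loop (indices ≥ 1), as a plain fold over the parts
def pvAFold : List (List Char) → (List Char × Int) → (List Char × Int)
  | [], st => st
  | p :: ps, st =>
    if st.2 < 3 then pvAFold ps (st.1 ++ pvEmDash ++ p, st.2 + 1)
    else pvAFold ps (st.1 ++ [' '] ++ p, st.2)

theorem pvEnumFold (ps : List (List Char)) (s : Int) (st : List Char × Int) (hs : 1 ≤ s) :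
    (PySem.List.enumerate ps s).foldl
      (fun (st : List Char × Int) ip =>
        if ip.1 == 0 then (ip.2, st.2)
        else if st.2 < 3 then (st.1 ++ pvEmDash ++ ip.2, st.2 + 1)
        else (st.1 ++ [' '] ++ ip.2, st.2)) st = pvAFold ps st := by
  induction ps generalizing s st with
  | nil => simp [PySem.List.enumerate_nil, pvAFold]
  | cons p ps ih =>
    rw [PySem.List.enumerate_cons]
    have hz : (s == 0) = false := by simp; omega
    simp only [List.foldl_cons, hz, Bool.false_eq_true, if_neg, not_false_iff]
    rw [ih _ _ (by omega)]
    simp only [pvAFold]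
    split <;> simp

theorem pvKey (cs : List Char) (cur acc : List Char) (r : Int) (h0 : 0 ≤ r) (h3 : r ≤ 3) :
    pvAFold (pvSplitSp cs cur).tail (acc ++ (pvSplitSp cs cur).headI, r)
      = ((acc ++ cur.reverse) ++ pvScan cs r, min 3 (r + cs.countP (· == ' '))) := by
  induction cs generalizing cur acc r with
  | nil =>
    simp [pvSplitSp, pvAFold, pvScan]
    omega
  | cons c rest ih =>
    by_cases hc : c = ' '
    · subst hc
      obtain ⟨h, t, hht⟩ : ∃ h t, pvSplitSp rest [] = h :: t := by
        cases heq : pvSplitSp rest [] with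
        | nil => exact absurd heq (pvSplitSp_ne_nil rest [])
        | cons h t => exact ⟨h, t, rfl⟩
      rw [show pvSplitSp (' ' :: rest) cur = cur.reverse :: pvSplitSp rest [] from by
            simp [pvSplitSp], hht, List.tail_cons, List.headI_cons]
      by_cases hr : r < 3
      · simp only [pvAFold, if_pos hr]
        have := ih [] (acc ++ cur.reverse ++ pvEmDash) (r + 1) (by omega) (by omega)
        rw [hht] at this
        simp only [List.tail_cons, List.headI_cons] at this
        rw [show (acc ++ cur.reverse, r).1 ++ pvEmDash ++ h
              = acc ++ cur.reverse ++ pvEmDash ++ h by simp]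
        rw [this]
        have hsc : pvScan (' ' :: rest) r = pvEmDash ++ pvScan rest (r + 1) := by
          simp [pvScan, hr]
        rw [hsc]
        simp only [Prod.mk.injEq, List.countP_cons, List.append_assoc]
        refine ⟨by simp, by simp; omega⟩
      · simp only [pvAFold, if_neg hr]
        have := ih [] (acc ++ cur.reverse ++ [' ']) r h0 h3
        rw [hht] at this
        simp only [List.tail_cons, List.headI_cons] at this
        rw [show (acc ++ cur.reverse, r).1 ++ [' '] ++ h
              = acc ++ cur.reverse ++ [' '] ++ h by simp]
        rw [this]
        have hsc : pvScan (' ' :: rest) r = ' ' :: pvScan rest r := by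
          simp only [pvScan]
          have : (' ' == ' ' && decide (r < 3)) = false := by simp; omega
          rw [this]; simp
        rw [hsc]
        simp only [Prod.mk.injEq, List.countP_cons, List.append_assoc]
        refine ⟨by simp, by simp; omega⟩
    · simp only [pvSplitSp, if_neg hc]
      rw [ih (c :: cur) acc r h0 h3]
      have hcb : (c == ' ') = false := by simpa using hc
      simp [pvScan, hcb, List.append_assoc]

-- ===== VERDICT (by name: the statement is the Claim_ definition above) =====
theorem replace_first_three_spaces_spec : Claim_equal_replace_first_three_spaces := by
  intro name _
  unfold Spec_replace_first_three_spaces replace_first_three_spaces replace_first_three_spaces_alt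
  rw [pvSplitOn_eq]
  by_cases hlen : (pvSplitSp name.toList []).length ≤ 1
  · simp only [hlen, if_pos]
    rw [pvScan_no_space name.toList 0 (by
      have := pvSplitSp_length name.toList []
      omega)]
    exact String.ofList_toList.symm
  · simp only [hlen, if_neg, not_false_iff]
    obtain ⟨p0, ps, hps⟩ : ∃ p0 ps, pvSplitSp name.toList [] = p0 :: ps := by
      cases heq : pvSplitSp name.toList [] with
      | nil => exact absurd heq (pvSplitSp_ne_nil name.toList [])
      | cons p0 ps => exact ⟨p0, ps, rfl⟩
    rw [hps, PySem.List.enumerate_cons]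
    simp only [List.foldl_cons, if_pos, beq_self_eq_true]
    rw [pvEnumFold ps (0 + 1) (p0, (([] : List Char), (0 : Int)).2) (by omega)]
    have := pvKey name.toList [] [] 0 (by omega) (by omega)
    rw [hps] at this
    simp only [List.tail_cons, List.headI_cons, List.nil_append, List.reverse_nil,
      List.append_nil] at this
    rw [this]
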